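-- pv_equiv track=rewrite | github.com/goblin-cola/genai_study_guide | genai_study_guides/genai_study_guides/02_sliding_window_counts.py | sliding_window_counts
-- ===== SOURCE A (Python) =====
-- from collections import deque
--
-- def sliding_window_counts(events, window_seconds):
--     """For each event, compute how many events this user has in the window.
--
--     events = list of (user_id, amount, timestamp), sorted by timestamp
--     window_seconds = how far back to look
--
--     Returns list of (user_id, timestamp, count)
--     """
--
--     # each user gets their own deque (queue) of timestamps
--     # deque = double-ended queue, efficient to add/remove from both ends
--     # in JS: just an array, but shift() is O(n) — deque is O(1) for popleft
--     per_user = {}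
--     results = []
--
--     for user_id, _amount, ts in events:
--         # _amount: underscore means "I'm ignoring this value"
--         # we only need the user and timestamp for counting
--
--         # get or create this user's queue
--         if user_id not in per_user:
--             per_user[user_id] = deque()
--         q = per_user[user_id]
--
--         # add the current timestamp
--         q.append(ts)
--
--         # remove timestamps that have fallen outside the window
--         # cutoff = "anything before this time is too old"
--         # example: ts=7, window=5 -> cutoff=2 -> remove anything < 2
--         cutoff = ts - window_seconds
--         while q and q[0] < cutoff:
--             q.popleft()  # remove from front (oldest)
--
--         # whatever is left in the queue = events in the window
--         count = len(q)
--         results.append((user_id, ts, count))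
--
--     return results
-- ===== SOURCE B (Python) =====
-- def sliding_window_counts(events, window_seconds):
--     """For each event, compute how many events this user has in the window.
--
--     events = list of (user_id, amount, timestamp), sorted by timestamp
--     window_seconds = how far back to look
--
--     Returns list of (user_id, timestamp, count)
--     """
--     # pass 1: group each user's timestamps once, in arrival order
--     ts_lists = {}
--     for user_id, _amount, ts in events:
--         ts_lists.setdefault(user_id, []).append(ts)
--
--     def counts_for(lst):
--         # the whole count sequence for one user: after the (i+1)-th timestamp
--         # the window holds lst[s..i], with the start pointer s only advancing
--         s = 0
--         out = []
--         for i, ts in enumerate(lst):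
--             cutoff = ts - window_seconds
--             while s <= i and lst[s] < cutoff:
--                 s += 1
--             out.append(i - s + 1)
--         return out
--
--     # pass 2: stitch the per-user count sequences back into the original order
--     counts = {}
--     seen = {}
--     results = []
--     for user_id, _amount, ts in events:
--         if user_id not in counts:
--             counts[user_id] = counts_for(ts_lists[user_id])
--         i = seen.get(user_id, 0)
--         results.append((user_id, ts, counts[user_id][i]))
--         seen[user_id] = i + 1
--     return results
-- ===== Notes on version B (the rewrite author's own statement) =====
-- stated objective: alternative
-- what changed: Replaces the single interleaved pass with mutable per-user deques by a group-by pass (user -> timestamp list), an independent per-user two-pointer scan producing each user's whole count sequence at once, and a final pass that stitches those sequences back into event order via an occurrence counter.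
import Mathlib
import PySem

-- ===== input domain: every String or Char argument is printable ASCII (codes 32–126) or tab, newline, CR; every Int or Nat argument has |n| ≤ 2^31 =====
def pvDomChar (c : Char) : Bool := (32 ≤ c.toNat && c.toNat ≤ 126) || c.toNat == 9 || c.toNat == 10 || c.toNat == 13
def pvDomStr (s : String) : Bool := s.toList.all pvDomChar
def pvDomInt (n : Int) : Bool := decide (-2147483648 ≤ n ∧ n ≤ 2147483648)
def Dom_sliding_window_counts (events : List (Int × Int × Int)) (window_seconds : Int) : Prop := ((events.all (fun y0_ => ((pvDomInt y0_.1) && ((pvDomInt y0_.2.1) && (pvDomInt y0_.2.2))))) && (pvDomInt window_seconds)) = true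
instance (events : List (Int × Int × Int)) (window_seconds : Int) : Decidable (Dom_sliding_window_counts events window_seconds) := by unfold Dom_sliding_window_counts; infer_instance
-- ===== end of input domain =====

-- B replaces the interleaved deque pass by group-by + an independent per-user two-pointer scan
-- + a stitching pass (objective: alternative structure, same cost). A mutates its internal dict
-- of deques only; the return value is what is compared.


-- ===== PORT A =====
-- while q and q[0] < cutoff: q.popleft()
def pvTrimA : List Int → Int → List Int
  | [], _ => []
  | t :: rest, cutoff => if t < cutoff then pvTrimA rest cutoff else t :: rest

-- one iteration of A's event loop; the in-place mutation of the deque is modelled by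
-- re-inserting the trimmed list (same dict value)
def pvStepA (w : Int) (st : PySem.Dict Int (List Int) × List (Int × Int × Int))
    (e : Int × Int × Int) : PySem.Dict Int (List Int) × List (Int × Int × Int) :=
  let per_user := if st.1.contains e.1 then st.1 else st.1.insert e.1 []
  let q := per_user.getD e.1 [] ++ [e.2.2]
  let q2 := pvTrimA q (e.2.2 - w)
  (per_user.insert e.1 q2, st.2 ++ [(e.1, e.2.2, (q2.length : Int))])

def sliding_window_counts (events : List (Int × Int × Int)) (window_seconds : Int) :
    List (Int × Int × Int) :=
  (events.foldl (pvStepA window_seconds) (PySem.Dict.empty, [])).2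

-- ===== PORT B =====
-- while s <= i and lst[s] < cutoff: s += 1  (lst[s] is read only when s <= i < len(lst),
-- so the getD default is never used)
def pvAdvB (lst : List Int) (cutoff : Int) (i : Nat) (s : Nat) : Nat :=
  if s ≤ i ∧ lst.getD s 0 < cutoff then pvAdvB lst cutoff i (s + 1) else s
  termination_by i + 1 - s
  decreasing_by omega

-- counts_for(lst): fold over enumerate(lst) carrying (s, out)
def pvCountsB (w : Int) (lst : List Int) : List Int :=
  ((lst.zipIdx).foldl (fun (st : Nat × List Int) p =>
      let s := pvAdvB lst (p.1 - w) p.2 st.1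
      (s, st.2 ++ [(p.2 : Int) - (s : Int) + 1])) (0, ([] : List Int))).2

-- one iteration of B's stitching loop; counts[u][i] is always in range, so pyGetD's
-- default is never used; ts_lists[u] is always present, so getD's default is never used
def pvStepB (w : Int) (ts_lists : PySem.Dict Int (List Int))
    (st : PySem.Dict Int (List Int) × PySem.Dict Int Int × List (Int × Int × Int))
    (e : Int × Int × Int) :
    PySem.Dict Int (List Int) × PySem.Dict Int Int × List (Int × Int × Int) :=
  let counts := if st.1.contains e.1 then st.1
                else st.1.insert e.1 (pvCountsB w (ts_lists.getD e.1 []))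
  let i := st.2.1.getD e.1 0
  (counts, st.2.1.insert e.1 (i + 1),
   st.2.2 ++ [(e.1, e.2.2, PySem.List.pyGetD (counts.getD e.1 []) i 0)])

def sliding_window_counts_alt (events : List (Int × Int × Int)) (window_seconds : Int) :
    List (Int × Int × Int) :=
  -- pass 1: ts_lists.setdefault(u, []).append(ts)
  let ts_lists := events.foldl (fun d e => d.modify e.1 [] (· ++ [e.2.2])) PySem.Dict.empty
  -- pass 2: stitch per-user count sequences back into event order
  (events.foldl (pvStepB window_seconds ts_lists)
      (PySem.Dict.empty, PySem.Dict.empty, [])).2.2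

-- ===== PRECONDITION & SPEC =====
def Spec_sliding_window_counts (events : List (Int × Int × Int)) (window_seconds : Int) (out : List (Int × Int × Int)) : Prop := out = sliding_window_counts_alt events window_seconds
instance (events : List (Int × Int × Int)) (window_seconds : Int) (out : List (Int × Int × Int)) : Decidable (Spec_sliding_window_counts events window_seconds out) := by unfold Spec_sliding_window_counts; infer_instance

-- ===== CLAIM (what is proved, stated in full; the proofs are below) =====
def Claim_equal_sliding_window_counts : Prop := ∀ (events : List (Int × Int × Int)) (window_seconds : Int), Dom_sliding_window_counts events window_seconds → Spec_sliding_window_counts events window_seconds (sliding_window_counts events window_seconds)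

-- ===== LEMMAS AND PROOFS =====

-- timestamps of user u, in arrival order
def tsOf (u : Int) (evs : List (Int × Int × Int)) : List Int :=
  (evs.filter (fun e => e.1 == u)).map (fun e => e.2.2)

-- reference start pointer after processing a whole timestamp list
def specSAux (w : Int) (pre : List Int) (s : Nat) : List Int → Nat
  | [] => s
  | t :: rest => specSAux w (pre ++ [t]) (pvAdvB (pre ++ [t]) (t - w) pre.length s) rest

def specS (w : Int) (lst : List Int) : Nat := specSAux w [] 0 lst

-- reference count sequence
def specOutAux (w : Int) (pre : List Int) (s : Nat) : List Int → List Int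
  | [] => []
  | t :: rest =>
    ((pre.length : Int) - (pvAdvB (pre ++ [t]) (t - w) pre.length s : Int) + 1) ::
      specOutAux w (pre ++ [t]) (pvAdvB (pre ++ [t]) (t - w) pre.length s) rest

-- reference result list
def refRes (w : Int) : List (Int × Int × Int) → List (Int × Int × Int) → List (Int × Int × Int)
  | _, [] => []
  | seen, e :: rest =>
    (e.1, e.2.2, ((tsOf e.1 seen ++ [e.2.2]).length : Int)
        - (specS w (tsOf e.1 seen ++ [e.2.2]) : Int)) :: refRes w (seen ++ [e]) rest

lemma tsOf_nil (u : Int) : tsOf u [] = [] := rfl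

lemma tsOf_append (u : Int) (l₁ l₂ : List (Int × Int × Int)) :
    tsOf u (l₁ ++ l₂) = tsOf u l₁ ++ tsOf u l₂ := by
  simp [tsOf]

lemma tsOf_singleton_self (e : Int × Int × Int) : tsOf e.1 [e] = [e.2.2] := by
  simp [tsOf]

lemma tsOf_singleton_ne (u : Int) (e : Int × Int × Int) (h : u ≠ e.1) : tsOf u [e] = [] := by
  simp [tsOf]; omega

lemma pvAdvB_le (lst : List Int) (c : Int) (i : Nat) :
    ∀ s, s ≤ i + 1 → pvAdvB lst c i s ≤ i + 1 := by
  have key : ∀ k s, i + 1 - s ≤ k → s ≤ i + 1 → pvAdvB lst c i s ≤ i + 1 := by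
    intro k
    induction k with
    | zero => intro s hk hs; rw [pvAdvB]
              rw [if_neg (by omega : ¬ (s ≤ i ∧ lst.getD s 0 < c))]; omega
    | succ k ih =>
      intro s hk hs; rw [pvAdvB]
      by_cases h : s ≤ i ∧ lst.getD s 0 < c
      · rw [if_pos h]; exact ih (s + 1) (by omega) (by omega)
      · rw [if_neg h]; omega
  exact fun s hs => key (i + 1 - s) s le_rfl hs

lemma pvAdvB_append (lst ext : List Int) (c : Int) (i : Nat) (hi : i < lst.length) :
    ∀ s, pvAdvB (lst ++ ext) c i s = pvAdvB lst c i s := by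
  have key : ∀ k s, i + 1 - s ≤ k → pvAdvB (lst ++ ext) c i s = pvAdvB lst c i s := by
    intro k
    induction k with
    | zero =>
      intro s hk
      have h : ¬ (s ≤ i ∧ (lst ++ ext).getD s 0 < c) := by omega
      have h' : ¬ (s ≤ i ∧ lst.getD s 0 < c) := by omega
      conv_lhs => rw [pvAdvB, if_neg h]
      conv_rhs => rw [pvAdvB, if_neg h']
    | succ k ih =>
      intro s hk
      by_cases hs : s ≤ i
      · have hget : (lst ++ ext).getD s 0 = lst.getD s 0 :=
          List.getD_append _ _ _ _ (by omega)
        conv_lhs => rw [pvAdvB, hget]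
        conv_rhs => rw [pvAdvB]
        by_cases h : s ≤ i ∧ lst.getD s 0 < c
        · rw [if_pos h, if_pos h]; exact ih (s + 1) (by omega)
        · rw [if_neg h, if_neg h]
      · have h : ¬ (s ≤ i ∧ (lst ++ ext).getD s 0 < c) := by omega
        have h' : ¬ (s ≤ i ∧ lst.getD s 0 < c) := by omega
        conv_lhs => rw [pvAdvB, if_neg h]
        conv_rhs => rw [pvAdvB, if_neg h']
  exact fun s => key (i + 1 - s) s le_rfl

lemma trim_eq_drop_adv (L : List Int) (c : Int) (n : Nat) (hL : L.length = n + 1) :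
    ∀ s, s ≤ L.length → pvTrimA (L.drop s) c = L.drop (pvAdvB L c n s) := by
  have key : ∀ k s, L.length - s ≤ k → s ≤ L.length →
      pvTrimA (L.drop s) c = L.drop (pvAdvB L c n s) := by
    intro k
    induction k with
    | zero =>
      intro s hk hs
      have hse : s = L.length := by omega
      have h : ¬ (s ≤ n ∧ L.getD s 0 < c) := by omega
      rw [pvAdvB, if_neg h, hse]; simp [pvTrimA]
    | succ k ih =>
      intro s hk hs
      by_cases hlt : s < L.length
      · have hdrop : L.drop s = L[s] :: L.drop (s + 1) := List.drop_eq_getElem_cons hlt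
        have hget : L.getD s 0 = L[s] := List.getD_eq_getElem L 0 hlt
        rw [pvAdvB, hget]
        by_cases hc : L[s] < c
        · rw [if_pos ⟨by omega, hc⟩, hdrop]
          simp only [pvTrimA, if_pos hc]
          exact ih (s + 1) (by omega) (by omega)
        · rw [if_neg (by tauto : ¬ (s ≤ n ∧ L[s] < c)), hdrop]
          simp only [pvTrimA, if_neg hc]
      · have hse : s = L.length := by omega
        have h : ¬ (s ≤ n ∧ L.getD s 0 < c) := by omega
        rw [pvAdvB, if_neg h, hse]; simp [pvTrimA]
  exact fun s hs => key (L.length - s) s le_rfl hs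

lemma specSAux_append (w : Int) (l₁ l₂ : List Int) :
    ∀ pre s, specSAux w pre s (l₁ ++ l₂) = specSAux w (pre ++ l₁) (specSAux w pre s l₁) l₂ := by
  induction l₁ with
  | nil => intro pre s; simp [specSAux]
  | cons t l₁ ih =>
    intro pre s
    simp only [List.cons_append, specSAux]
    rw [ih]
    simp [List.append_assoc]

lemma specS_snoc (w : Int) (L : List Int) (t : Int) :
    specS w (L ++ [t]) = pvAdvB (L ++ [t]) (t - w) L.length (specS w L) := by
  unfold specS
  rw [specSAux_append]
  simp [specSAux]

lemma specSAux_le (w : Int) : ∀ (l : List Int) (pre : List Int) (s : Nat),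
    s ≤ pre.length → specSAux w pre s l ≤ (pre ++ l).length := by
  intro l
  induction l with
  | nil => intro pre s hs; simpa [specSAux] using le_trans hs (by simp)
  | cons t l ih =>
    intro pre s hs
    simp only [specSAux]
    have h1 : pvAdvB (pre ++ [t]) (t - w) pre.length s ≤ pre.length + 1 :=
      pvAdvB_le _ _ _ s (by omega)
    have := ih (pre ++ [t]) _ (by simpa using h1)
    simpa [List.append_assoc] using this

lemma specS_le (w : Int) (l : List Int) : specS w l ≤ l.length := by
  simpa using specSAux_le w l [] 0 (by simp)

lemma specOutAux_append (w : Int) (l₁ l₂ : List Int) :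
    ∀ pre s, specOutAux w pre s (l₁ ++ l₂)
      = specOutAux w pre s l₁ ++ specOutAux w (pre ++ l₁) (specSAux w pre s l₁) l₂ := by
  induction l₁ with
  | nil => intro pre s; simp [specOutAux, specSAux]
  | cons t l₁ ih =>
    intro pre s
    simp only [List.cons_append, specOutAux, specSAux]
    rw [ih]
    simp [List.append_assoc]

lemma specOutAux_length (w : Int) : ∀ (l : List Int) (pre : List Int) (s : Nat),
    (specOutAux w pre s l).length = l.length := by
  intro l
  induction l with
  | nil => intro pre s; simp [specOutAux]
  | cons t l ih => intro pre s; simp [specOutAux, ih]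

lemma runB_aux (w : Int) (lst : List Int) :
    ∀ (rest pre : List Int) (s : Nat) (out : List Int), lst = pre ++ rest → s ≤ pre.length →
    ((rest.zipIdx pre.length).foldl (fun (st : Nat × List Int) p =>
        let s := pvAdvB lst (p.1 - w) p.2 st.1
        (s, st.2 ++ [(p.2 : Int) - (s : Int) + 1])) (s, out))
      = (specSAux w pre s rest, out ++ specOutAux w pre s rest) := by
  intro rest
  induction rest with
  | nil => intro pre s out h hs; simp [specSAux, specOutAux]
  | cons t rest ih =>
    intro pre s out h hs
    have hlst : lst = (pre ++ [t]) ++ rest := by simpa using h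
    rw [List.zipIdx_cons, List.foldl_cons]
    have hadv : pvAdvB lst (t - w) pre.length s
        = pvAdvB (pre ++ [t]) (t - w) pre.length s := by
      rw [hlst]; exact pvAdvB_append (pre ++ [t]) rest (t - w) pre.length (by simp) s
    simp only [hadv]
    have hlen : pre.length + 1 = (pre ++ [t]).length := by simp
    rw [hlen,
      ih (pre ++ [t]) (pvAdvB (pre ++ [t]) (t - w) pre.length s)
        (out ++ [(pre.length : Int) - (pvAdvB (pre ++ [t]) (t - w) pre.length s : Int) + 1])
        (by simpa using h)
        (by simpa using pvAdvB_le (pre ++ [t]) (t - w) pre.length s (by omega))]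
    simp [specSAux, specOutAux]

-- pvCountsB computes the reference count sequence
lemma countsB_eq (w : Int) (lst : List Int) : pvCountsB w lst = specOutAux w [] 0 lst := by
  have := runB_aux w lst lst [] 0 [] rfl (by simp)
  unfold pvCountsB
  rw [show lst.zipIdx = lst.zipIdx ([] : List Int).length from rfl, this]
  simp

-- A's event loop produces the reference results
lemma A_inv (w : Int) : ∀ (rest seen : List (Int × Int × Int))
    (d : PySem.Dict Int (List Int)) (acc : List (Int × Int × Int)),
    (∀ u, d.getD u [] = (tsOf u seen).drop (specS w (tsOf u seen))) →
    (rest.foldl (pvStepA w) (d, acc)).2 = acc ++ refRes w seen rest := by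
  intro rest
  induction rest with
  | nil => intro seen d acc hinv; simp [refRes]
  | cons e rest ih =>
    intro seen d acc hinv
    have hsle := specS_le w (tsOf e.1 seen)
    have hpu : ∀ v, (if d.contains e.1 then d else d.insert e.1 []).getD v [] = d.getD v [] := by
      intro v
      by_cases hc : d.contains e.1
      · simp [hc]
      · rw [if_neg (by simpa using hc)]
        by_cases hv : v = e.1
        · subst hv
          rw [PySem.Dict.getD_insert_self,
            PySem.Dict.getD_of_not_contains d [] (by simpa using hc)]
        · exact PySem.Dict.getD_insert_of_ne d [] [] hv
    have hq : (if d.contains e.1 then d else d.insert e.1 []).getD e.1 [] ++ [e.2.2]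
        = (tsOf e.1 seen ++ [e.2.2]).drop (specS w (tsOf e.1 seen)) := by
      rw [hpu, hinv e.1, List.drop_append_of_le_length hsle]
    have htrim : pvTrimA ((tsOf e.1 seen ++ [e.2.2]).drop (specS w (tsOf e.1 seen))) (e.2.2 - w)
        = (tsOf e.1 seen ++ [e.2.2]).drop (specS w (tsOf e.1 seen ++ [e.2.2])) := by
      rw [trim_eq_drop_adv (tsOf e.1 seen ++ [e.2.2]) (e.2.2 - w) (tsOf e.1 seen).length
          (by simp) (specS w (tsOf e.1 seen)) (by simp; omega), ← specS_snoc]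
    have hlen : ((((tsOf e.1 seen ++ [e.2.2]).drop
          (specS w (tsOf e.1 seen ++ [e.2.2]))).length : Int))
        = ((tsOf e.1 seen ++ [e.2.2]).length : Int)
          - (specS w (tsOf e.1 seen ++ [e.2.2]) : Int) := by
      have := specS_le w (tsOf e.1 seen ++ [e.2.2])
      rw [List.length_drop]; omega
    have hstep : pvStepA w (d, acc) e
        = ((if d.contains e.1 then d else d.insert e.1 []).insert e.1
            ((tsOf e.1 seen ++ [e.2.2]).drop (specS w (tsOf e.1 seen ++ [e.2.2]))),
           acc ++ [(e.1, e.2.2, ((tsOf e.1 seen ++ [e.2.2]).length : Int)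
            - (specS w (tsOf e.1 seen ++ [e.2.2]) : Int))]) := by
      simp only [pvStepA]
      rw [hq, htrim, hlen]
    have hts : tsOf e.1 (seen ++ [e]) = tsOf e.1 seen ++ [e.2.2] := by
      rw [tsOf_append, tsOf_singleton_self]
    have hinv' : ∀ v, ((if d.contains e.1 then d else d.insert e.1 []).insert e.1
          ((tsOf e.1 seen ++ [e.2.2]).drop (specS w (tsOf e.1 seen ++ [e.2.2])))).getD v []
        = (tsOf v (seen ++ [e])).drop (specS w (tsOf v (seen ++ [e]))) := by
      intro v
      by_cases hv : v = e.1
      · subst hv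
        rw [PySem.Dict.getD_insert_self, hts]
      · rw [PySem.Dict.getD_insert_of_ne _ _ [] hv, hpu v, hinv v, tsOf_append,
          tsOf_singleton_ne v e hv]
        simp
    rw [List.foldl_cons, hstep, ih (seen ++ [e]) _ _ hinv']
    simp [refRes]

-- B's stitching loop produces the reference results
lemma B_inv (w : Int) (events : List (Int × Int × Int)) (G : PySem.Dict Int (List Int))
    (hG : ∀ u, G.getD u [] = tsOf u events) :
    ∀ (rest pre : List (Int × Int × Int)) (cd : PySem.Dict Int (List Int))
      (idx : PySem.Dict Int Int) (acc : List (Int × Int × Int)),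
      events = pre ++ rest →
      (∀ u, idx.getD u 0 = ((tsOf u pre).length : Int)) →
      (∀ u, cd.contains u = true → cd.getD u [] = pvCountsB w (tsOf u events)) →
      (rest.foldl (pvStepB w G) (cd, idx, acc)).2.2 = acc ++ refRes w pre rest := by
  intro rest
  induction rest with
  | nil => intro pre cd idx acc hE hidx hcd; simp [refRes]
  | cons e rest ih =>
    intro pre cd idx acc hE hidx hcd
    have hc1 : (if cd.contains e.1 then cd
          else cd.insert e.1 (pvCountsB w (G.getD e.1 []))).getD e.1 []
        = pvCountsB w (tsOf e.1 events) := by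
      by_cases hc : cd.contains e.1
      · rw [if_pos hc]; exact hcd e.1 hc
      · rw [if_neg (by simpa using hc), PySem.Dict.getD_insert_self, hG]
    have hc2 : ∀ v, (if cd.contains e.1 then cd
          else cd.insert e.1 (pvCountsB w (G.getD e.1 []))).contains v = true →
        (if cd.contains e.1 then cd
          else cd.insert e.1 (pvCountsB w (G.getD e.1 []))).getD v []
        = pvCountsB w (tsOf v events) := by
      intro v
      by_cases hc : cd.contains e.1
      · rw [if_pos hc]; exact hcd v
      · rw [if_neg (by simpa using hc)]
        intro hv
        by_cases hve : v = e.1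
        · subst hve; rw [PySem.Dict.getD_insert_self, hG]
        · rw [PySem.Dict.getD_insert_of_ne _ _ [] hve]
          refine hcd v ?_
          rw [PySem.Dict.contains_insert] at hv
          simpa [hve] using hv
    have htsE : tsOf e.1 events = tsOf e.1 pre ++ (e.2.2 :: tsOf e.1 rest) := by
      rw [hE, tsOf_append]
      congr 1
      rw [show (e :: rest) = [e] ++ rest from rfl, tsOf_append, tsOf_singleton_self]
      rfl
    have hval : PySem.List.pyGetD (pvCountsB w (tsOf e.1 events))
          (((tsOf e.1 pre).length : Nat) : Int) 0
        = ((tsOf e.1 pre ++ [e.2.2]).length : Int)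
          - (specS w (tsOf e.1 pre ++ [e.2.2]) : Int) := by
      rw [PySem.List.pyGetD_natCast, htsE, countsB_eq,
        specOutAux_append w (tsOf e.1 pre) (e.2.2 :: tsOf e.1 rest),
        show ((tsOf e.1 pre).length : Nat)
            = (specOutAux w [] 0 (tsOf e.1 pre)).length from
          (specOutAux_length w (tsOf e.1 pre) [] 0).symm,
        List.getD_append_right _ _ 0 _ le_rfl]
      simp only [Nat.sub_self, specOutAux, List.getD_cons_zero, List.nil_append]
      rw [show specSAux w [] 0 (tsOf e.1 pre) = specS w (tsOf e.1 pre) from rfl,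
        ← specS_snoc w (tsOf e.1 pre) e.2.2]
      simp
      omega
    have hidx' : ∀ u, (idx.insert e.1 (idx.getD e.1 0 + 1)).getD u 0
        = ((tsOf u (pre ++ [e])).length : Int) := by
      intro u
      by_cases hu : u = e.1
      · subst hu
        rw [PySem.Dict.getD_insert_self, hidx e.1, tsOf_append, tsOf_singleton_self]
        simp
      · rw [PySem.Dict.getD_insert_of_ne _ _ 0 hu, hidx u, tsOf_append,
          tsOf_singleton_ne u e hu]
        simp
    have hstep : pvStepB w G (cd, idx, acc) e
        = ((if cd.contains e.1 then cd
            else cd.insert e.1 (pvCountsB w (G.getD e.1 []))),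
           idx.insert e.1 (idx.getD e.1 0 + 1),
           acc ++ [(e.1, e.2.2, ((tsOf e.1 pre ++ [e.2.2]).length : Int)
            - (specS w (tsOf e.1 pre ++ [e.2.2]) : Int))]) := by
      simp only [pvStepB]
      rw [hc1, hidx e.1, hval]
    rw [List.foldl_cons, hstep,
      ih (pre ++ [e]) _ _ _ (by simpa using hE) hidx' hc2]
    simp [refRes]

lemma group_getD (events : List (Int × Int × Int)) (u : Int) :
    (events.foldl (fun d e => d.modify e.1 [] (· ++ [e.2.2])) PySem.Dict.empty).getD u []
      = tsOf u events := by
  rw [show (events.foldl (fun d e => d.modify e.1 [] (· ++ [e.2.2])) PySem.Dict.empty)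
        = ((events.map (fun e => (e.1, e.2.2))).foldl
            (fun d p => d.modify p.1 [] (· ++ [p.2])) PySem.Dict.empty) from
      (by rw [List.foldl_map]),
    PySem.Dict.getD_foldl_modify_append]
  simp [tsOf, List.filter_map, Function.comp_def]

-- ===== VERDICT (by name: the statement is the Claim_ definition above) =====
theorem sliding_window_counts_spec : Claim_equal_sliding_window_counts := by
  intro events w _
  unfold Spec_sliding_window_counts sliding_window_counts sliding_window_counts_alt
  rw [A_inv w events [] PySem.Dict.empty []
        (by intro u; simp [PySem.Dict.getD_empty, tsOf_nil]),
      B_inv w events _ (fun u => group_getD events u) events [] PySem.Dict.empty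
        PySem.Dict.empty [] rfl
        (by intro u; simp [PySem.Dict.getD_empty, tsOf_nil])
        (by intro u h; simp [PySem.Dict.contains_empty] at h)]
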